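-- pv_equiv track=rewrite | github.com/ljc31555/A2 | src/models/llm_api.py | _merge_rewritten_segments
-- ===== SOURCE A (Python) =====
-- def _merge_rewritten_segments(segments: list) -> str:
--     """
--     合并改写后的文本段落，处理重叠部分
--     """
--     if not segments:
--         return ""
--     if len(segments) == 1:
--         return segments[0]
--
--     merged_text = segments[0]
--
--     for i in range(1, len(segments)):
--         current_segment = segments[i]
--
--         # 简单合并，添加适当的分隔
--         if not merged_text.endswith('\n'):
--             merged_text += '\n'
--         merged_text += current_segment
--
--     # 去除多余的空行，保留段落间的单个换行
--     lines = merged_text.split('\n')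
--     cleaned_lines = []
--     prev_empty = False
--
--     for line in lines:
--         line_stripped = line.strip()
--         if line_stripped:  # 非空行
--             cleaned_lines.append(line)
--             prev_empty = False
--         else:  # 空行
--             if not prev_empty:  # 只保留第一个空行
--                 cleaned_lines.append('')
--             prev_empty = True
--
--     # 移除开头和结尾的空行
--     while cleaned_lines and not cleaned_lines[0].strip():
--         cleaned_lines.pop(0)
--     while cleaned_lines and not cleaned_lines[-1].strip():
--         cleaned_lines.pop()
--
--     return '\n'.join(cleaned_lines)
-- ===== SOURCE B (Python) =====
-- def _merge_rewritten_segments(segments: list) -> str: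
--     if not segments:
--         return ""
--     if len(segments) == 1:
--         return segments[0]
--     head, *rest = segments
--
--     def nl(s):
--         return s if s.endswith("\n") else s + "\n"
--
--     # phase 1: every piece except the last contributes itself newline-terminated;
--     # empty middle pieces contribute nothing (the running text already ends in '\n')
--     merged = nl(head) + "".join(nl(s) for s in rest[:-1] if s) + rest[-1]
--
--     # phase 2: group consecutive lines into blank/non-blank runs,
--     # collapse each blank run to a single '', trim a blank run at each edge
--     lines = merged.split("\n")
--     runs = []
--     i, n = 0, len(lines)
--     while i < n:
--         key = bool(lines[i].strip())
--         j = i + 1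
--         while j < n and bool(lines[j].strip()) == key:
--             j += 1
--         runs.append((key, lines[i:j] if key else [""]))
--         i = j
--     if runs and not runs[0][0]:
--         runs.pop(0)
--     if runs and not runs[-1][0]:
--         runs.pop()
--     return "\n".join(line for _, run in runs for line in run)
-- ===== Notes on version B (the rewrite author's own statement) =====
-- stated objective: alternative
-- what changed: Phase 2 is rewritten: instead of a prev_empty flag loop plus two while/pop trim loops, B groups consecutive lines into blank/non-blank runs, collapses each blank run to a single '' and trims one blank run at each edge; phase 1 becomes a join of newline-terminated pieces (empty middle pieces contribute nothing) instead of a conditional-append fold.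
import Mathlib
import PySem

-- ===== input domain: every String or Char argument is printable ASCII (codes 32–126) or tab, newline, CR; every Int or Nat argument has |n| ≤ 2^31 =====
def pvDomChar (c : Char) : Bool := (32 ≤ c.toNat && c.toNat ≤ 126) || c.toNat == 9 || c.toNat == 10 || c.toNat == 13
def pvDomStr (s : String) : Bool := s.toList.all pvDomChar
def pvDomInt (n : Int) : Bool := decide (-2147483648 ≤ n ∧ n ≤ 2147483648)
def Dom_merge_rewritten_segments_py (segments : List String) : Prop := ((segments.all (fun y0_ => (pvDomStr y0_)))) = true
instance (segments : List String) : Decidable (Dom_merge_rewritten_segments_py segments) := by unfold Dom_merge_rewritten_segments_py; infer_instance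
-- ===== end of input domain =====

-- B replaces A's prev_empty flag and the two while/pop trim loops by grouping the lines
-- into blank/non-blank runs, collapsing each blank run to one '' and trimming a blank
-- run at each edge (objective: alternative decomposition, same cost).

-- ===== PORT A =====
-- strings are carried as their code-point lists (PySem.Chars is the List Char form of the str API)

-- bool(line.strip()) == False
def pvBlank (l : List Char) : Bool := PySem.Chars.strip l == []

-- while cleaned_lines and not cleaned_lines[0].strip(): cleaned_lines.pop(0)
def pvTrimFront : List (List Char) → List (List Char)
  | [] => []
  | l :: ls => if pvBlank l then pvTrimFront ls else l :: ls

-- while cleaned_lines and not cleaned_lines[-1].strip(): cleaned_lines.pop()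
def pvTrimBack : List (List Char) → List (List Char)
  | [] => []
  | l :: ls =>
    match pvTrimBack ls with
    | [] => if pvBlank l then [] else [l]
    | r => l :: r

def merge_rewritten_segments_py (segments : List String) : String :=
  match segments with
  | [] => ""
  | [s] => s
  | s0 :: rest =>
    -- phase 1: conditional-separator merge
    let merged := rest.foldl (fun m cur =>
        (if PySem.Chars.endswith m ['\n'] then m else m ++ ['\n']) ++ cur.toList) s0.toList
    -- phase 2: collapse runs of blank lines with the prev_empty flag
    let lines := PySem.Chars.splitOn merged ['\n']
    let st := lines.foldl (fun (st : List (List Char) × Bool) line =>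
        if pvBlank line then ((if st.2 then st.1 else st.1 ++ [[]]), true)
        else (st.1 ++ [line], false)) ([], false)
    String.ofList (PySem.Chars.join ['\n'] (pvTrimBack (pvTrimFront st.1)))

-- ===== PORT B =====

-- nl(s) = s if s.endswith('\n') else s + '\n'
def pvNl (s : List Char) : List Char := if PySem.Chars.endswith s ['\n'] then s else s ++ ['\n']

-- the while-loop of B: group lines into maximal runs of equal blankness,
-- a blank run is recorded as [''] straight away
def pvRuns : List (List Char) → List (Bool × List (List Char))
  | [] => []
  | l :: ls =>
    let k := !pvBlank l
    (k, if k then l :: ls.takeWhile (fun x => (!pvBlank x) == k) else [[]]) ::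
      pvRuns (ls.dropWhile (fun x => (!pvBlank x) == k))
  termination_by ls => ls.length
  decreasing_by
    simpa using Nat.lt_succ_of_le (List.length_dropWhile_le _ _)

-- if runs and not runs[0][0]: runs.pop(0)
def pvPopFront (rs : List (Bool × List (List Char))) : List (Bool × List (List Char)) :=
  match rs with
  | (false, _) :: t => t
  | other => other

-- if runs and not runs[-1][0]: runs.pop()
def pvPopBack (rs : List (Bool × List (List Char))) : List (Bool × List (List Char)) :=
  match rs.getLast? with
  | some (false, _) => rs.dropLast
  | _ => rs

def merge_rewritten_segments_py_alt (segments : List String) : String :=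
  match segments with
  | [] => ""
  | [s] => s
  | s0 :: rest =>
    -- phase 1: nl(head) + ''.join(nl(s) for s in rest[:-1] if s) + rest[-1]
    let merged := pvNl s0.toList ++
      PySem.Chars.join [] ((rest.dropLast.filter (fun s => s ≠ "")).map (fun s => pvNl s.toList)) ++
      (rest.getLastD "").toList
    -- phase 2: runs, edge trims, flatten, join
    let lines := PySem.Chars.splitOn merged ['\n']
    let rs := pvPopBack (pvPopFront (pvRuns lines))
    String.ofList (PySem.Chars.join ['\n'] (rs.flatMap (·.2)))

-- ===== PRECONDITION & SPEC =====
def Spec_merge_rewritten_segments_py (segments : List String) (out : String) : Prop := out = merge_rewritten_segments_py_alt segments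
instance (segments : List String) (out : String) : Decidable (Spec_merge_rewritten_segments_py segments out) := by unfold Spec_merge_rewritten_segments_py; infer_instance

-- ===== CLAIM (what is proved, stated in full; the proofs are below) =====
def Claim_equal_merge_rewritten_segments_py : Prop := ∀ (segments : List String), Dom_merge_rewritten_segments_py segments → Spec_merge_rewritten_segments_py segments (merge_rewritten_segments_py segments)

-- ===== LEMMAS AND PROOFS =====

-- A's cleaning loop, written as structural recursion on the lines with the prev_empty flag
def pvClean : Bool → List (List Char) → List (List Char)
  | _, [] => []
  | prev, l :: ls =>
    if pvBlank l then (if prev then pvClean true ls else [] :: pvClean true ls)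
    else l :: pvClean false ls

-- shape invariant of pvRuns: runs are non-empty, key true = all lines non-blank,
-- key false = the collapsed [''] , and adjacent keys differ
def pvGood (rs : List (Bool × List (List Char))) : Prop :=
  (∀ p ∈ rs, p.2 ≠ [] ∧ (p.1 = true → ∀ x ∈ p.2, pvBlank x = false) ∧ (p.1 = false → p.2 = [[]])) ∧
  rs.IsChain (fun a b => a.1 ≠ b.1)

theorem pv_suffix_singleton (x : Char) (l : List Char) : ([x] <:+ l) ↔ l.getLast? = some x := by
  constructor
  · rintro ⟨t, rfl⟩; simp
  · rw [List.getLast?_eq_some_iff]; rintro ⟨l', rfl⟩; exact ⟨l', rfl⟩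

theorem pv_endswith_append {a b : List Char} (hb : b ≠ []) :
    PySem.Chars.endswith (a ++ b) ['\n'] = PySem.Chars.endswith b ['\n'] := by
  apply Bool.eq_iff_iff.mpr
  rw [PySem.Chars.endswith_iff, PySem.Chars.endswith_iff,
    pv_suffix_singleton, pv_suffix_singleton, List.getLast?_append_of_ne_nil _ hb]

theorem pv_nl_endswith (s : List Char) : PySem.Chars.endswith (pvNl s) ['\n'] = true := by
  unfold pvNl
  split
  · assumption
  · rw [PySem.Chars.endswith_iff]; exact ⟨s, rfl⟩

theorem pv_nl_idem (s : List Char) : pvNl (pvNl s) = pvNl s := by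
  have h := pv_nl_endswith s
  show (if PySem.Chars.endswith (pvNl s) ['\n'] = true then pvNl s else pvNl s ++ ['\n']) = pvNl s
  simp [h]

theorem pv_nl_append (a t : List Char) (ht : t ≠ []) : pvNl (pvNl a ++ t) = pvNl a ++ pvNl t := by
  show (if PySem.Chars.endswith (pvNl a ++ t) ['\n'] = true then pvNl a ++ t else (pvNl a ++ t) ++ ['\n']) = _
  rw [pv_endswith_append ht]
  unfold pvNl
  split <;> simp

theorem pv_join_flatten (l : List (List Char)) : PySem.Chars.join [] l = l.flatten := by
  simp [PySem.Chars.join, List.intercalate]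
  induction l with
  | nil => rfl
  | cons x xs ih =>
    cases xs with
    | nil => simp
    | cons y ys => simp_all [List.intersperse]

-- phase 1: A's foldl equals B's join formula
theorem pv_phase1 (rest : List String) (s0 : List Char) (h : rest ≠ []) :
    rest.foldl (fun m cur =>
        (if PySem.Chars.endswith m ['\n'] then m else m ++ ['\n']) ++ cur.toList) s0 =
      pvNl s0 ++
        PySem.Chars.join [] ((rest.dropLast.filter (fun s => s ≠ "")).map (fun s => pvNl s.toList)) ++
        (rest.getLastD "").toList := by
  induction rest generalizing s0 with
  | nil => exact absurd rfl h
  | cons t ts ih =>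
    match ts with
    | [] =>
      show pvNl s0 ++ t.toList = _
      simp
    | u :: us =>
      have step : (List.foldl (fun m cur =>
          (if PySem.Chars.endswith m ['\n'] = true then m else m ++ ['\n']) ++ cur.toList)
            s0 (t :: u :: us)) = (List.foldl (fun m cur =>
          (if PySem.Chars.endswith m ['\n'] = true then m else m ++ ['\n']) ++ cur.toList)
            (pvNl s0 ++ t.toList) (u :: us)) := rfl
      rw [step, ih (pvNl s0 ++ t.toList) (by simp)]
      by_cases ht : t = ""
      · subst ht
        simp [pv_nl_idem]
      · have htl : t.toList ≠ [] := fun hh => ht (String.toList_eq_nil_iff.mp hh)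
        rw [pv_nl_append _ _ htl]
        simp [pv_join_flatten, ht, List.append_assoc]

-- A's loop as a foldl equals pvClean
theorem pv_foldl_clean (ls : List (List Char)) (acc : List (List Char)) (prev : Bool) :
    (ls.foldl (fun (st : List (List Char) × Bool) line =>
        if pvBlank line then ((if st.2 then st.1 else st.1 ++ [[]]), true)
        else (st.1 ++ [line], false)) (acc, prev)).1 = acc ++ pvClean prev ls := by
  induction ls generalizing acc prev with
  | nil => simp [pvClean]
  | cons l ls ih =>
    by_cases hb : pvBlank l = true
    · by_cases hp : prev = true
      · subst hp; simp [List.foldl_cons, hb, pvClean, ih]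
      · replace hp : prev = false := by revert hp; cases prev <;> simp
        subst hp; simp [List.foldl_cons, hb, pvClean, ih]
    · replace hb : pvBlank l = false := by revert hb; cases pvBlank l <;> simp
      simp [List.foldl_cons, hb, pvClean, ih]

theorem pvRuns_nil : pvRuns [] = [] := by rw [pvRuns]
theorem pvRuns_cons (l : List Char) (ls : List (List Char)) :
    pvRuns (l :: ls) =
      (!pvBlank l, if (!pvBlank l) = true then l :: ls.takeWhile (fun x => (!pvBlank x) == !pvBlank l) else [[]]) ::
        pvRuns (ls.dropWhile (fun x => (!pvBlank x) == !pvBlank l)) := by rw [pvRuns]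
theorem pv_blank_nil : pvBlank [] = true := by decide
theorem pv_clean_nonblank_run (run rest : List (List Char)) (h : ∀ x ∈ run, pvBlank x = false) :
    pvClean false (run ++ rest) = run ++ pvClean false rest := by
  induction run with
  | nil => rfl
  | cons x xs ih =>
    have hx := h x (List.mem_cons_self ..)
    simp only [List.cons_append, pvClean, hx]
    simp only [Bool.false_eq_true, if_false, List.cons.injEq, true_and]
    exact ih (fun y hy => h y (List.mem_cons_of_mem _ hy))
theorem pv_clean_true_blank_run (run rest : List (List Char)) (h : ∀ x ∈ run, pvBlank x = true) :
    pvClean true (run ++ rest) = pvClean true rest := by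
  induction run with
  | nil => rfl
  | cons x xs ih =>
    have hx := h x (List.mem_cons_self ..)
    simp only [List.cons_append, pvClean, hx, if_true]
    exact ih (fun y hy => h y (List.mem_cons_of_mem _ hy))
theorem pv_clean_true_eq_false (rest : List (List Char))
    (h : ∀ d, rest.head? = some d → pvBlank d = false) :
    pvClean true rest = pvClean false rest := by
  cases rest with
  | nil => rfl
  | cons d ds =>
    have hd := h d rfl
    simp [pvClean, hd]
theorem pv_drophead (p : List Char → Bool) (ls : List (List Char)) (d : List Char)
    (hd : (ls.dropWhile p).head? = some d) : p d = false := by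
  have h3 := List.head?_dropWhile_not p ls
  rw [hd] at h3
  exact h3

theorem pv_clean_eq_runs (ls : List (List Char)) :
    pvClean false ls = (pvRuns ls).flatMap (·.2) := by
  induction ls using pvRuns.induct with
  | case1 => rw [pvRuns_nil]; rfl
  | case2 l ls k ih =>
    simp only [show k = !pvBlank l from rfl] at ih
    rw [pvRuns_cons]
    by_cases hb : pvBlank l = true
    · have hk : (!pvBlank l) = false := by simp [hb]
      simp only [hk, Bool.false_eq_true, if_false, List.flatMap_cons]
      have htake : ∀ x ∈ ls.takeWhile (fun x => (!pvBlank x) == false), pvBlank x = true := by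
        intro x hx
        have := List.mem_takeWhile_imp hx
        simpa using this
      have step : pvClean false (l :: ls) = [] :: pvClean true ls := by
        simp [pvClean, hb]
      rw [step]
      conv_lhs => rw [← List.takeWhile_append_dropWhile (p := fun x => (!pvBlank x) == false) (l := ls)]
      rw [pv_clean_true_blank_run _ _ htake]
      rw [pv_clean_true_eq_false _ (fun d hd => by
        have := pv_drophead _ ls d hd; simpa using this)]
      rw [hk] at ih
      rw [ih]
      rfl
    · replace hb : pvBlank l = false := by revert hb; cases pvBlank l <;> simp
      have hk : (!pvBlank l) = true := by simp [hb]
      simp only [hk, if_true, List.flatMap_cons]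
      have htake : ∀ x ∈ ls.takeWhile (fun x => (!pvBlank x) == true), pvBlank x = false := by
        intro x hx
        have := List.mem_takeWhile_imp hx
        simpa using this
      have step : pvClean false (l :: ls) = l :: pvClean false ls := by
        simp [pvClean, hb]
      rw [step]
      conv_lhs => rw [← List.takeWhile_append_dropWhile (p := fun x => (!pvBlank x) == true) (l := ls)]
      rw [pv_clean_nonblank_run _ _ htake]
      rw [hk] at ih
      rw [ih]
      simp

theorem pv_runs_good (ls : List (List Char)) : pvGood (pvRuns ls) := by
  induction ls using pvRuns.induct with
  | case1 => rw [pvRuns_nil]; exact ⟨by simp, by simp⟩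
  | case2 l ls k ih =>
    simp only [show k = !pvBlank l from rfl] at ih
    rw [pvRuns_cons]
    obtain ⟨ihe, ihc⟩ := ih
    constructor
    · intro p hp
      rcases List.mem_cons.mp hp with rfl | hp
      · by_cases hb : (!pvBlank l) = true
        · simp only [hb, if_true]
          refine ⟨by simp, ?_, by intro h; exact absurd h (by simp)⟩
          intro _ x hx
          rcases List.mem_cons.mp hx with rfl | hx
          · simpa using hb
          · have := List.mem_takeWhile_imp hx
            simpa using this
        · have hb' : (!pvBlank l) = false := by revert hb; cases (!pvBlank l) <;> simp
          simp only [hb', Bool.false_eq_true, if_false]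
          exact ⟨by simp, by simp, by simp⟩
      · exact ihe p hp
    · rw [List.isChain_cons]
      refine ⟨?_, ihc⟩
      intro y hy
      cases hdrop : ls.dropWhile (fun x => (!pvBlank x) == !pvBlank l) with
      | nil => rw [hdrop, pvRuns_nil] at hy; simp at hy
      | cons d ds =>
        rw [hdrop, pvRuns_cons] at hy
        simp only [List.head?_cons, Option.mem_some_iff] at hy
        have hd : ((!pvBlank d) == !pvBlank l) = false := pv_drophead _ ls d (by rw [hdrop]; rfl)
        subst hy
        simp only [ne_eq]
        intro hcontra
        rw [← hcontra] at hd
        simp at hd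
theorem pv_trimBack_append_nonblank (xs : List (List Char)) {a : List Char} (ha : pvBlank a = false) :
    pvTrimBack (xs ++ [a]) = xs ++ [a] := by
  induction xs with
  | nil => simp [pvTrimBack, ha]
  | cons x xs ih =>
    show pvTrimBack (x :: (xs ++ [a])) = _
    unfold pvTrimBack
    rw [ih]
    cases h : xs ++ [a] with
    | nil => simp at h
    | cons y ys =>
      show x :: y :: ys = x :: (xs ++ [a])
      rw [h]

theorem pv_trimBack_append_blank (xs : List (List Char)) {a : List Char} (ha : pvBlank a = true) :
    pvTrimBack (xs ++ [a]) = pvTrimBack xs := by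
  induction xs with
  | nil => simp [pvTrimBack, ha]
  | cons x xs ih =>
    show pvTrimBack (x :: (xs ++ [a])) = pvTrimBack (x :: xs)
    unfold pvTrimBack
    rw [ih]

theorem pv_trimFront_flat {rs : List (Bool × List (List Char))} (hg : pvGood rs) :
    pvTrimFront (rs.flatMap (·.2)) = (pvPopFront rs).flatMap (·.2) := by
  obtain ⟨he, hc⟩ := hg
  match rs with
  | [] => rfl
  | (true, r) :: t =>
    obtain ⟨hne, hnb, -⟩ := he _ (List.mem_cons_self ..)
    cases r with
    | nil => exact absurd rfl hne
    | cons x xs =>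
      have hx : pvBlank x = false := hnb rfl x (List.mem_cons_self ..)
      show pvTrimFront (x :: (xs ++ _)) = _
      simp [pvTrimFront, hx, pvPopFront, List.flatMap_def]
  | (false, r) :: t =>
    obtain ⟨-, -, hr⟩ := he _ (List.mem_cons_self ..)
    have hr' : r = [[]] := hr rfl
    subst hr'
    rw [show (((false, ([[]] : List (List Char))) :: t).flatMap (fun x => x.2)) = [] :: t.flatMap (fun x => x.2) by simp]
    show pvTrimFront ([] :: t.flatMap (fun x => x.2)) = (pvPopFront ((false, [[]]) :: t)).flatMap (fun x => x.2)
    simp only [pvTrimFront, pv_blank_nil, if_true, pvPopFront]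
    cases t with
    | nil => rfl
    | cons q t2 =>
      obtain ⟨hne2, hnb2, hr2⟩ := he q (List.mem_cons_of_mem _ (List.mem_cons_self ..))
      have hq : q.1 = true := by
        rw [List.isChain_cons] at hc
        have := hc.1 q (by simp)
        revert this
        cases q.1 <;> simp
      obtain ⟨k2, r2⟩ := q
      simp only at hq
      subst hq
      cases r2 with
      | nil => exact absurd rfl hne2
      | cons x xs =>
        have hx : pvBlank x = false := hnb2 rfl x (List.mem_cons_self ..)
        show pvTrimFront (x :: _) = _
        simp [pvTrimFront, hx, List.flatMap_def]

theorem pv_popFront_good {rs : List (Bool × List (List Char))} (hg : pvGood rs) :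
    pvGood (pvPopFront rs) := by
  obtain ⟨he, hc⟩ := hg
  unfold pvPopFront
  match rs with
  | [] => exact ⟨he, hc⟩
  | (false, r) :: t =>
    refine ⟨fun p hp => he p (List.mem_cons_of_mem _ hp), ?_⟩
    exact (List.isChain_cons.mp hc).2
  | (true, r) :: t => exact ⟨he, hc⟩

theorem pv_trimBack_flat {rs : List (Bool × List (List Char))} (hg : pvGood rs) :
    pvTrimBack (rs.flatMap (·.2)) = (pvPopBack rs).flatMap (·.2) := by
  obtain ⟨he, hc⟩ := hg
  rcases List.eq_nil_or_concat rs with rfl | ⟨init, ⟨k, r⟩, rfl⟩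
  · rfl
  · rw [List.concat_eq_append] at he hc ⊢
    have hflat : (init ++ [(k, r)]).flatMap (fun x => x.2) = init.flatMap (fun x => x.2) ++ r := by
      simp
    rw [hflat]
    cases k with
    | true =>
      obtain ⟨hne, hnb, -⟩ := he (true, r) (by simp)
      rcases List.eq_nil_or_concat r with rfl | ⟨r', a, rfl⟩
      · exact absurd rfl hne
      · rw [List.concat_eq_append] at he hc hflat hne hnb ⊢
        have ha : pvBlank a = false := hnb rfl a (by simp)
        rw [← List.append_assoc, pv_trimBack_append_nonblank _ ha]
        unfold pvPopBack
        rw [List.getLast?_concat]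
        simp
    | false =>
      obtain ⟨-, -, hr⟩ := he (false, r) (by simp)
      have hr' : r = [[]] := hr rfl
      subst hr'
      rw [show ([[]] : List (List Char)) = [] ++ [[]] from rfl, ← List.append_assoc,
        pv_trimBack_append_blank _ pv_blank_nil]
      simp only [List.append_nil]
      unfold pvPopBack
      rw [List.getLast?_concat]
      simp only [List.dropLast_concat]
      rcases List.eq_nil_or_concat init with rfl | ⟨init', ⟨k2, r2⟩, rfl⟩
      · rfl
      · rw [List.concat_eq_append] at he hc ⊢
        obtain ⟨hne2, hnb2, hr2⟩ := he (k2, r2) (by simp)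
        have hk2 : k2 = true := by
          rw [List.isChain_append] at hc
          have := hc.2.2 (k2, r2) (by rw [List.getLast?_concat]; rfl) (false, [[]]) rfl
          revert this
          cases k2 <;> simp
        subst hk2
        rcases List.eq_nil_or_concat r2 with rfl | ⟨r2', a2, rfl⟩
        · exact absurd rfl hne2
        · rw [List.concat_eq_append] at he hc hne2 hnb2 ⊢
          have ha2 : pvBlank a2 = false := hnb2 rfl a2 (by simp)
          have hre : (init' ++ [(true, r2' ++ [a2])]).flatMap (fun x => x.2) =
              (init'.flatMap (fun x => x.2) ++ r2') ++ [a2] := by simp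
          rw [hre, pv_trimBack_append_nonblank _ ha2]

-- ===== VERDICT (by name: the statement is the Claim_ definition above) =====
theorem merge_rewritten_segments_py_spec : Claim_equal_merge_rewritten_segments_py := by
  intro segments _
  unfold Spec_merge_rewritten_segments_py
  match segments with
  | [] => rfl
  | [s] => rfl
  | s0 :: t :: ts =>
    show String.ofList _ = String.ofList _
    rw [pv_phase1 (t :: ts) s0.toList (by simp)]
    rw [pv_foldl_clean, List.nil_append, pv_clean_eq_runs,
        pv_trimFront_flat (pv_runs_good _), pv_trimBack_flat (pv_popFront_good (pv_runs_good _))]
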